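-- pv_equiv track=rewrite | github.com/gyang94/fluss | fluss-e2e/fluss-e2e-cli/fluss_e2e/cli.py | _provided_scenario_options
-- ===== SOURCE A (Python) =====
-- SCENARIO_OPTION_FLAGS = {
--     "--rows": "rows",
--     "--tables": "tables",
-- }
--
-- def _provided_scenario_options(argv: list[str]) -> set[str]:
--     provided: set[str] = set()
--     for token in argv:
--         if token in SCENARIO_OPTION_FLAGS:
--             provided.add(SCENARIO_OPTION_FLAGS[token])
--             continue
--         for flag, option_name in SCENARIO_OPTION_FLAGS.items():
--             if token.startswith(f"{flag}="):
--                 provided.add(option_name)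
--                 break
--     return provided
-- ===== SOURCE B (Python) =====
-- SCENARIO_OPTION_FLAGS = {
--     "--rows": "rows",
--     "--tables": "tables",
-- }
--
--
-- def _provided_scenario_options(argv):
--     # Staged pipeline instead of A's single pass with an accumulator and an
--     # inner scan over the flag dict:
--     #   1. canonicalize every token to its key (text before the first '='),
--     #   2. map each key through the flag dict (dropping misses),
--     #   3. deduplicate the hit list into a set.
--     keys = [token.split("=", 1)[0] for token in argv]
--     hits = [SCENARIO_OPTION_FLAGS[key] for key in keys if key in SCENARIO_OPTION_FLAGS]
--     return set(hits)
-- ===== Notes on version B (the rewrite author's own statement) =====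
-- stated objective: simpler
-- what changed: Replaces A's single accumulator pass with per-token exact-match branch plus an inner startswith scan over the flag dict by a staged pipeline: map every token to its key before the first '=', look each key up once in SCENARIO_OPTION_FLAGS collecting the hits, then deduplicate the hit list into a set.
import Mathlib
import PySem

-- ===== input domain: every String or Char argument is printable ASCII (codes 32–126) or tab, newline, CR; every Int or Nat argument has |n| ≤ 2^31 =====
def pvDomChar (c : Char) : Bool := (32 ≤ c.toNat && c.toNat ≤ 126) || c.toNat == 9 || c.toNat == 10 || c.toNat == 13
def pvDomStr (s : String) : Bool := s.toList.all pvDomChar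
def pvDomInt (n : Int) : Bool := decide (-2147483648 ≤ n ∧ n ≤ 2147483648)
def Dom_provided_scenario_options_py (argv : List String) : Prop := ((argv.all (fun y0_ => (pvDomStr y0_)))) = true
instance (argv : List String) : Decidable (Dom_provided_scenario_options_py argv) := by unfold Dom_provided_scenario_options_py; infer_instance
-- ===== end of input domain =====

-- B replaces A's single accumulator pass (exact-match branch plus inner startswith scan
-- over the flag dict) by a staged pipeline: map tokens to their key before the first '=',
-- look each key up once collecting the hits, then deduplicate; objective: simpler.

-- ===== PORT A =====
def SCENARIO_OPTION_FLAGS : PySem.Dict String String :=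
  PySem.Dict.ofList [("--rows", "rows"), ("--tables", "tables")]

-- inner 'for flag, option_name in SCENARIO_OPTION_FLAGS.items():' loop with break
def psoInner (token : String) (provided : PySem.Set String) :
    List (String × String) → PySem.Set String
  | [] => provided
  | (flag, optionName) :: rest =>
      if PySem.Str.startswith token (flag ++ "=") then PySem.Set.add provided optionName
      else psoInner token provided rest

def provided_scenario_options_py (argv : List String) : List String :=
  argv.foldl
    (fun provided token =>
      if SCENARIO_OPTION_FLAGS.contains token then
        PySem.Set.add provided (SCENARIO_OPTION_FLAGS.getD token "")
      else psoInner token provided SCENARIO_OPTION_FLAGS.items)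
    PySem.Set.empty

-- ===== PORT B =====
def provided_scenario_options_py_alt (argv : List String) : List String :=
  let keys := argv.map (fun token => ((PySem.Str.splitMax? token "=" 1).getD []).headD "")
  let hits := keys.filterMap (fun key => SCENARIO_OPTION_FLAGS.get? key)
  PySem.Set.ofList hits

-- ===== PRECONDITION & SPEC =====
def Spec_provided_scenario_options_py (argv : List String) (out : List String) : Prop := out = provided_scenario_options_py_alt argv
instance (argv : List String) (out : List String) : Decidable (Spec_provided_scenario_options_py argv out) := by unfold Spec_provided_scenario_options_py; infer_instance

-- ===== CLAIM (what is proved, stated in full; the proofs are below) =====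
def Claim_equal_provided_scenario_options_py : Prop := ∀ (argv : List String), Dom_provided_scenario_options_py argv → Spec_provided_scenario_options_py argv (provided_scenario_options_py argv)

-- ===== LEMMAS AND PROOFS =====
-- go with maxsplit budget 0 returns immediately
theorem go_zero (f : Nat) (l cur : List Char) (acc : List (List Char)) :
    PySem.Chars.splitOnMax.go ['='] f 0 l cur acc = ((cur.reverse ++ l) :: acc).reverse := by
  match f, l with
  | 0, l => rfl
  | f+1, [] => simp [PySem.Chars.splitOnMax.go]
  | f+1, c :: rest => simp [PySem.Chars.splitOnMax.go]

def restPart (cs : List Char) : List (List Char) :=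
  match cs.dropWhile (fun c => c ≠ '=') with
  | [] => []
  | _ :: r => [r]

theorem go_one : ∀ (f : Nat) (cs cur : List Char) (acc : List (List Char)), cs.length < f →
    PySem.Chars.splitOnMax.go ['='] f 1 cs cur acc
      = acc.reverse ++ (cur.reverse ++ cs.takeWhile (fun c => c ≠ '=')) :: restPart cs := by
  intro f
  induction f with
  | zero => intro cs cur acc h; omega
  | succ f ih =>
    intro cs cur acc h
    match cs with
    | [] => simp [PySem.Chars.splitOnMax.go, restPart]
    | c :: rest =>
      by_cases hc : c = '='
      · subst hc
        simp only [PySem.Chars.splitOnMax.go, List.isPrefixOf]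
        norm_num
        rw [go_zero]
        simp [restPart, List.dropWhile]
      · have hpre : List.isPrefixOf ['='] (c :: rest) = false := by
          simp [List.isPrefixOf, BEq.beq]
          intro h'; exact absurd h'.symm hc
        simp only [PySem.Chars.splitOnMax.go]
        norm_num [hpre]
        rw [ih rest (c :: cur) acc (by simpa using Nat.lt_of_succ_lt_succ h)]
        simp [List.takeWhile, List.dropWhile, hc, restPart]

theorem splitHead (cs : List Char) :
    PySem.Chars.splitMax? cs ['='] 1 = some ((cs.takeWhile (fun c => c ≠ '=')) :: restPart cs) := by
  simp [PySem.Chars.splitMax?, PySem.Chars.splitOnMax]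
  rw [go_one (cs.length + 1) cs [] [] (by omega)]
  simp

theorem keyOf_eq (t : String) :
    ((PySem.Str.splitMax? t "=" 1).getD []).headD ""
      = String.ofList (t.toList.takeWhile (fun c => c ≠ '=')) := by
  have : ("=" : String).toList = ['='] := rfl
  simp [PySem.Str.splitMax?, this, splitHead]

theorem takeWhile_eq_iff : ∀ (cs w : List Char), (∀ c ∈ w, c ≠ '=') →
    (cs.takeWhile (fun c => c ≠ '=') = w ↔ cs = w ∨ (w ++ ['=']) <+: cs) := by
  intro cs
  induction cs with
  | nil =>
    intro w hw
    constructor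
    · intro h; left; simpa using h.symm
    · rintro (h | h)
      · simp [← h]
      · rcases h with ⟨r, hr⟩
        cases w <;> simp_all
  | cons c rest ih =>
    intro w hw
    by_cases hc : c = '='
    · subst hc
      simp only [List.takeWhile]
      norm_num
      constructor
      · rintro rfl; right; exact ⟨rest, rfl⟩
      · rintro (h | h)
        · exact absurd (hw '=' (by rw [← h]; exact List.mem_cons_self)) (by simp)
        · cases w with
          | nil => rfl
          | cons d w' =>
            rcases (List.cons_prefix_cons.mp h) with ⟨hd, _⟩
            exact absurd hd (hw d List.mem_cons_self)
    · have hdec : (decide (c ≠ '=')) = true := by simp [hc]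
      simp only [List.takeWhile, hdec]
      cases w with
      | nil =>
        constructor
        · intro h; simp at h
        · rintro (h | h)
          · simp at h
          · rcases List.cons_prefix_cons.mp h with ⟨hd, _⟩
            exact absurd hd.symm hc
      | cons d w' =>
        have hw' : ∀ x ∈ w', x ≠ '=' := fun x hx => hw x (List.mem_cons_of_mem _ hx)
        constructor
        · intro h
          rcases List.cons_eq_cons.mp h with ⟨rfl, h2⟩
          rcases (ih w' hw').mp h2 with h3 | h3
          · left; rw [h3]
          · right; exact List.cons_prefix_cons.mpr ⟨rfl, h3⟩
        · rintro (h | h)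
          · rcases List.cons_eq_cons.mp h with ⟨rfl, h3⟩
            congr 1
            exact (ih w' hw').mpr (Or.inl h3)
          · rcases List.cons_prefix_cons.mp h with ⟨rfl, h2⟩
            congr 1
            exact (ih w' hw').mpr (Or.inr h2)

set_option maxRecDepth 8192 in
theorem step_eq (t : String) (acc : List String) :
    (if SCENARIO_OPTION_FLAGS.contains t then
        PySem.Set.add acc (SCENARIO_OPTION_FLAGS.getD t "")
      else psoInner t acc SCENARIO_OPTION_FLAGS.items)
    = (match SCENARIO_OPTION_FLAGS.get? (((PySem.Str.splitMax? t "=" 1).getD []).headD "") with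
       | some optionName => PySem.Set.add acc optionName
       | none => acc) := by
  rw [keyOf_eq]
  have hitems : SCENARIO_OPTION_FLAGS.items = [("--rows", "rows"), ("--tables", "tables")] := by
    decide
  have hflags : ∀ c ∈ ("--rows".toList), c ≠ '=' := by
    have h9 : ("--rows".toList.all (fun c => decide (c ≠ '='))) = true := by decide
    simpa using h9
  have hflagsT : ∀ c ∈ ("--tables".toList), c ≠ '=' := by
    have h9 : ("--tables".toList.all (fun c => decide (c ≠ '='))) = true := by decide
    simpa using h9
  by_cases hr : t.toList.takeWhile (fun c => c ≠ '=') = "--rows".toList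
  · have hkey : String.ofList (t.toList.takeWhile (fun c => c ≠ '=')) = "--rows" := by
      rw [hr]; rfl
    rw [hkey]
    have hget : SCENARIO_OPTION_FLAGS.get? "--rows" = some "rows" := by decide
    rw [hget]
    rcases (takeWhile_eq_iff t.toList "--rows".toList hflags).mp hr with h | h
    · have ht : t = "--rows" := String.ext_iff.mpr h
      subst ht
      have h1 : SCENARIO_OPTION_FLAGS.contains "--rows" = true := by decide
      have h2 : SCENARIO_OPTION_FLAGS.getD "--rows" "" = "rows" := by decide
      simp [h1, h2]
    · -- t starts with "--rows="
      have hne1 : t ≠ "--rows" := by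
        intro he; rw [he] at h
        have := h.length_le; simp at this
      have hne2 : t ≠ "--tables" := by
        intro he; rw [he] at h
        have h9 : ("--tables" : String).toList = ['-','-','t','a','b','l','e','s'] := by simp
        rw [h9] at h
        rcases h with ⟨r, hr9⟩
        simp at hr9
      have hcont : SCENARIO_OPTION_FLAGS.contains t = false := by
        simp [PySem.Dict.contains, hitems]
        exact ⟨fun he => hne1 he.symm, fun he => hne2 he.symm⟩
      rw [if_neg (by simp [hcont])]
      have hlit : ("--rows".toList ++ ['='] : List Char) = ['-','-','r','o','w','s','='] := by
        simp
      have hsw : PySem.Chars.startswith t.toList ['-','-','r','o','w','s','='] = true :=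
        (PySem.Chars.startswith_iff _ _).mpr (by rw [← hlit]; exact h)
      rw [hitems]
      simp [psoInner, hsw]
  · by_cases htb : t.toList.takeWhile (fun c => c ≠ '=') = "--tables".toList
    · have hkey : String.ofList (t.toList.takeWhile (fun c => c ≠ '=')) = "--tables" := by
        rw [htb]; rfl
      rw [hkey]
      have hget : SCENARIO_OPTION_FLAGS.get? "--tables" = some "tables" := by decide
      rw [hget]
      rcases (takeWhile_eq_iff t.toList "--tables".toList hflagsT).mp htb with h | h
      · have ht : t = "--tables" := String.ext_iff.mpr h
        subst ht
        have h1 : SCENARIO_OPTION_FLAGS.contains "--tables" = true := by decide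
        have h2 : SCENARIO_OPTION_FLAGS.getD "--tables" "" = "tables" := by decide
        simp [h1, h2]
      · have hne1 : t ≠ "--rows" := by
          intro he; rw [he] at h
          have := h.length_le; simp at this
        have hne2 : t ≠ "--tables" := by
          intro he; rw [he] at h
          have := h.length_le; simp at this
        have hcont : SCENARIO_OPTION_FLAGS.contains t = false := by
          simp [PySem.Dict.contains, hitems]
          exact ⟨fun he => hne1 he.symm, fun he => hne2 he.symm⟩
        rw [if_neg (by simp [hcont])]
        have hlitR : ("--rows".toList ++ ['='] : List Char) = ['-','-','r','o','w','s','='] := by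
          simp
        have hlitT : ("--tables".toList ++ ['='] : List Char)
            = ['-','-','t','a','b','l','e','s','='] := by simp
        have hswR : PySem.Chars.startswith t.toList ['-','-','r','o','w','s','='] = false := by
          rw [Bool.eq_false_iff]
          intro h9
          have := (takeWhile_eq_iff t.toList "--rows".toList hflags).mpr
            (Or.inr (by rw [hlitR]; exact (PySem.Chars.startswith_iff _ _).mp h9))
          exact hr this
        have hswT : PySem.Chars.startswith t.toList ['-','-','t','a','b','l','e','s','='] = true :=
          (PySem.Chars.startswith_iff _ _).mpr (by rw [← hlitT]; exact h)
        rw [hitems]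
        simp [psoInner, hswR, hswT]
    · have hget : SCENARIO_OPTION_FLAGS.get?
          (String.ofList (t.toList.takeWhile (fun c => c ≠ '='))) = none := by
        have hb1 : (("--rows" : String)
            == String.ofList (t.toList.takeWhile (fun c => c ≠ '='))) = false := by
          simp only [beq_eq_false_iff_ne, ne_eq]
          intro he
          exact hr (by simpa using congrArg String.toList he.symm)
        have hb2 : (("--tables" : String)
            == String.ofList (t.toList.takeWhile (fun c => c ≠ '='))) = false := by
          simp only [beq_eq_false_iff_ne, ne_eq]
          intro he
          exact htb (by simpa using congrArg String.toList he.symm)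
        simp only [PySem.Dict.get?, hitems]
        rw [List.find?_cons_of_neg (by simpa using hb1), List.find?_cons_of_neg (by simpa using hb2),
          List.find?_nil]
        rfl
      rw [hget]
      have hne1 : t ≠ "--rows" := by
        intro he; rw [he] at hr
        exact hr (by have : ("--rows" : String).toList = ['-','-','r','o','w','s'] := by simp
                     rw [this]; decide)
      have hne2 : t ≠ "--tables" := by
        intro he; rw [he] at htb
        exact htb (by have : ("--tables" : String).toList = ['-','-','t','a','b','l','e','s'] := by
                        simp
                      rw [this]; decide)
      have hcont : SCENARIO_OPTION_FLAGS.contains t = false := by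
        simp [PySem.Dict.contains, hitems]
        exact ⟨fun he => hne1 he.symm, fun he => hne2 he.symm⟩
      rw [if_neg (by simp [hcont])]
      have hlitR : ("--rows".toList ++ ['='] : List Char) = ['-','-','r','o','w','s','='] := by
        simp
      have hlitT : ("--tables".toList ++ ['='] : List Char)
          = ['-','-','t','a','b','l','e','s','='] := by simp
      have hswR : PySem.Chars.startswith t.toList ['-','-','r','o','w','s','='] = false := by
        rw [Bool.eq_false_iff]
        intro h9
        exact hr ((takeWhile_eq_iff t.toList "--rows".toList hflags).mpr
          (Or.inr (by rw [hlitR]; exact (PySem.Chars.startswith_iff _ _).mp h9)))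
      have hswT : PySem.Chars.startswith t.toList ['-','-','t','a','b','l','e','s','='] = false := by
        rw [Bool.eq_false_iff]
        intro h9
        exact htb ((takeWhile_eq_iff t.toList "--tables".toList hflagsT).mpr
          (Or.inr (by rw [hlitT]; exact (PySem.Chars.startswith_iff _ _).mp h9)))
      rw [hitems]
      simp [psoInner, hswR, hswT]

-- the canonicalize-then-lookup fold equals Set.add folded over the staged hit list
theorem fold_match_eq : ∀ (argv : List String) (acc : List String),
    List.foldl (fun provided token =>
        match SCENARIO_OPTION_FLAGS.get? (((PySem.Str.splitMax? token "=" 1).getD []).headD "") with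
        | some optionName => PySem.Set.add provided optionName
        | none => provided) acc argv
    = List.foldl PySem.Set.add acc
        ((argv.map (fun token => ((PySem.Str.splitMax? token "=" 1).getD []).headD "")).filterMap
          (fun key => SCENARIO_OPTION_FLAGS.get? key)) := by
  intro argv
  induction argv with
  | nil => intro acc; rfl
  | cons t rest ih =>
    intro acc
    simp only [List.foldl_cons, List.map_cons, List.filterMap_cons]
    cases hg : SCENARIO_OPTION_FLAGS.get?
        (((PySem.Str.splitMax? t "=" 1).getD []).headD "") with
    | none => simp only [hg]; exact ih acc
    | some o => simp only [hg, List.foldl_cons]; exact ih _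

theorem pso_fold_eq : ∀ (argv acc : List String),
    List.foldl (fun provided token =>
      if SCENARIO_OPTION_FLAGS.contains token then
        PySem.Set.add provided (SCENARIO_OPTION_FLAGS.getD token "")
      else psoInner token provided SCENARIO_OPTION_FLAGS.items) acc argv
    = List.foldl (fun provided token =>
        match SCENARIO_OPTION_FLAGS.get? (((PySem.Str.splitMax? token "=" 1).getD []).headD "") with
        | some optionName => PySem.Set.add provided optionName
        | none => provided) acc argv := by
  intro argv
  induction argv with
  | nil => intro acc; rfl
  | cons t rest ih =>
    intro acc
    simp only [List.foldl_cons]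
    rw [step_eq t acc]
    exact ih _

-- ===== VERDICT (by name: the statement is the Claim_ definition above) =====
theorem provided_scenario_options_py_spec : Claim_equal_provided_scenario_options_py := by
  intro argv _
  unfold Spec_provided_scenario_options_py provided_scenario_options_py
    provided_scenario_options_py_alt
  rw [pso_fold_eq, fold_match_eq]
  rw [PySem.Set.ofList_eq_foldl]
  rfl
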